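-- pv_equiv track=rewrite | github.com/satojkovic/algorithms | codejam/2022/1C/letter_blocks.py | check
-- ===== SOURCE A (Python) =====
-- def check(s):
--     prev = ''
--     m = set()
--     for c in s:
--         if prev != '' and (prev != c and c in m):
--             return False
--         m.add(c)
--         prev = c
--     return True
-- ===== SOURCE B (Python) =====
-- def check(s):
--     keys = list(s[:1]) + [b for a, b in zip(s, s[1:]) if a != b]
--     return len(keys) == len(set(keys))
-- ===== Notes on version B (the rewrite author's own statement) =====
-- stated objective: idiomatic
-- what changed: B first builds the run-length-encoded list of run-leader letters (first char plus each char differing from its predecessor, via zip of s with s[1:]) and then does one set-based duplicate check, instead of A's inline prev/seen-set scan with an early return.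
import Mathlib
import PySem

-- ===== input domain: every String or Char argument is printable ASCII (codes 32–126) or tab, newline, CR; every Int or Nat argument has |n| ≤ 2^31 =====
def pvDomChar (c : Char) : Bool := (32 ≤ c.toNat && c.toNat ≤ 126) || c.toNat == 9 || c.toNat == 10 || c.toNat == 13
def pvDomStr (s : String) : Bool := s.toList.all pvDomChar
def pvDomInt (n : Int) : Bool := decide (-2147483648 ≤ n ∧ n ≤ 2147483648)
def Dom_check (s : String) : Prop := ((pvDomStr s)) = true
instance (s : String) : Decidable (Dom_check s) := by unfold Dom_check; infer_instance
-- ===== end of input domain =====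

-- B builds the run-length-encoded list of run-leader letters first and then does one
-- set-based duplicate check, instead of A's inline prev/seen-set scan (idiomatic decomposition).


-- ===== PORT A =====
-- the for-loop with its early 'return False'; state = (prev, m) exactly as in A
def checkLoop (cs : List Char) (prev : String) (m : PySem.Set Char) : Bool :=
  match cs with
  | [] => true
  | c :: rest =>
    if prev ≠ "" ∧ (prev ≠ String.ofList [c] ∧ PySem.Set.contains m c) then false
    else checkLoop rest (String.ofList [c]) (PySem.Set.add m c)

def check (s : String) : Bool := checkLoop s.toList "" PySem.Set.empty

-- ===== PORT B =====
def check_alt (s : String) : Bool :=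
  let keys : List Char :=
    (PySem.Str.slice s none (some 1)).toList ++
      ((s.toList.zip (PySem.Str.slice s (some 1) none).toList).filterMap
        (fun p => if p.1 ≠ p.2 then some p.2 else none))
  decide (keys.length = (PySem.Set.ofList keys).length)

-- ===== PRECONDITION & SPEC =====
def Spec_check (s : String) (out : Bool) : Prop := out = check_alt s
instance (s : String) (out : Bool) : Decidable (Spec_check s out) := by unfold Spec_check; infer_instance

-- ===== CLAIM (what is proved, stated in full; the proofs are below) =====
def Claim_equal_check : Prop := ∀ (s : String), Dom_check s → Spec_check s (check s)

-- ===== LEMMAS AND PROOFS =====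

-- run-leader letters of a list (the RLE keys), as pure recursion
def runAux (p : Char) : List Char → List Char
  | [] => []
  | c :: cs => if c = p then runAux p cs else c :: runAux c cs

def runKeys : List Char → List Char
  | [] => []
  | c :: cs => c :: runAux c cs

-- 'each entry is fresh with respect to the growing seen-set'
def ok (m : PySem.Set Char) : List Char → Bool
  | [] => true
  | k :: ks => !(PySem.Set.contains m k) && ok (PySem.Set.add m k) ks

lemma update_cons (m : PySem.Set Char) (c : Char) (cs : List Char) :
    PySem.Set.update m (c :: cs) = PySem.Set.update (PySem.Set.add m c) cs := rfl

lemma add_of_contains (m : PySem.Set Char) (c : Char) (h : PySem.Set.contains m c = true) :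
    PySem.Set.add m c = m := by
  unfold PySem.Set.add; rw [h]; rfl

lemma contains_add_self (m : PySem.Set Char) (c : Char) :
    PySem.Set.contains (PySem.Set.add m c) c = true := by
  rw [PySem.Set.contains_iff, PySem.Set.mem_add]; right; rfl

lemma length_add (m : PySem.Set Char) (c : Char) :
    (PySem.Set.add m c).length = if PySem.Set.contains m c then m.length else m.length + 1 := by
  unfold PySem.Set.add; split <;> simp

lemma length_update_le (l : List Char) (m : PySem.Set Char) :
    (PySem.Set.update m l).length ≤ m.length + l.length := by
  induction l generalizing m with
  | nil => simp [PySem.Set.update]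
  | cons c cs ih =>
    have h := ih (PySem.Set.add m c)
    have h2 := length_add m c
    rw [update_cons]
    simp only [List.length_cons]
    split at h2 <;> omega

lemma ok_iff_length (l : List Char) (m : PySem.Set Char) :
    ok m l = decide ((PySem.Set.update m l).length = m.length + l.length) := by
  induction l generalizing m with
  | nil => simp [ok, PySem.Set.update]
  | cons c cs ih =>
    rw [update_cons]
    have hadd := length_add m c
    by_cases h : PySem.Set.contains m c
    · rw [if_pos h] at hadd
      have hle := length_update_le cs (PySem.Set.add m c)
      simp only [ok, h, Bool.not_true, Bool.false_and, List.length_cons]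
      have : ¬ (PySem.Set.update (PySem.Set.add m c) cs).length = m.length + (cs.length + 1) := by
        omega
      simp [this]
    · rw [if_neg h] at hadd
      simp only [ok, h, Bool.not_false, Bool.true_and, ih (PySem.Set.add m c), hadd,
        List.length_cons]
      rw [decide_eq_decide]
      omega

lemma ofList_one_eq (p c : Char) : (String.ofList [p] = String.ofList [c]) ↔ p = c := by
  constructor
  · intro h; have := congrArg String.toList h; simpa using this
  · intro h; rw [h]

lemma ofList_one_ne_empty (p : Char) : String.ofList [p] ≠ "" := by
  intro h; have := congrArg String.toList h; simp at this

lemma loopA (cs : List Char) (p : Char) (m : PySem.Set Char)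
    (hp : PySem.Set.contains m p = true) :
    checkLoop cs (String.ofList [p]) m = ok m (runAux p cs) := by
  induction cs generalizing p m with
  | nil => rfl
  | cons c rest ih =>
    by_cases hc : c = p
    · subst hc
      show (if _ then false else _) = ok m (runAux c (c :: rest))
      rw [if_neg (fun h => h.2.1 rfl), add_of_contains m c hp,
        show runAux c (c :: rest) = runAux c rest from by simp [runAux]]
      exact ih c m hp
    · show (if _ then false else _) = ok m (runAux p (c :: rest))
      rw [show runAux p (c :: rest) = c :: runAux c rest from by simp [runAux, hc]]
      by_cases hm : PySem.Set.contains m c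
      · rw [if_pos ⟨ofList_one_ne_empty p,
          fun h => hc ((ofList_one_eq p c).mp h).symm, hm⟩]
        have hmem : c ∈ m := (PySem.Set.contains_iff m c).mp hm
        simp [ok, hmem]
      · rw [if_neg (fun h => hm h.2.2)]
        simp only [ok, hm, Bool.not_false, Bool.true_and]
        exact ih c (PySem.Set.add m c) (contains_add_self m c)

lemma checkA (l : List Char) : checkLoop l "" PySem.Set.empty = ok PySem.Set.empty (runKeys l) := by
  cases l with
  | nil => rfl
  | cons c cs =>
    show (if _ then false else _) = ok PySem.Set.empty (c :: runAux c cs)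
    rw [if_neg (fun h => h.1 rfl),
      loopA cs c (PySem.Set.add PySem.Set.empty c) (contains_add_self _ c)]
    simp [ok]

lemma pairKeys (l : List Char) :
    l.take 1 ++ (l.zip l.tail).filterMap (fun p => if p.1 ≠ p.2 then some p.2 else none)
      = runKeys l := by
  induction l with
  | nil => rfl
  | cons c cs ih =>
    cases cs with
    | nil => rfl
    | cons d r =>
      have hF : (List.zip (d :: r) r).filterMap
          (fun p => if p.1 ≠ p.2 then some p.2 else none) = runAux d r := by
        have h := ih
        simp only [List.take, List.tail, runKeys, List.cons_append, List.nil_append,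
          List.cons.injEq] at h
        exact h.2
      simp only [ne_eq, ite_not] at hF
      by_cases h : c = d
      · subst h
        simp [runKeys, runAux, hF]
      · simp [runKeys, runAux, h, Ne.symm h, hF]

-- ===== VERDICT (by name: the statement is the Claim_ definition above) =====
theorem check_spec : Claim_equal_check := by
  intro s _
  unfold Spec_check check check_alt
  have h1 : (PySem.Str.slice s none (some 1)).toList = s.toList.take 1 := by simp [pysem]
  have h2 : (PySem.Str.slice s (some 1) none).toList = s.toList.tail := by simp [pysem]
  rw [checkA, ok_iff_length]
  simp only [h1, h2, pairKeys]
  rw [show PySem.Set.ofList (runKeys s.toList)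
      = PySem.Set.update PySem.Set.empty (runKeys s.toList) from by
    rw [PySem.Set.ofList_eq_foldl]; rfl]
  rw [decide_eq_decide]
  have : (PySem.Set.empty : PySem.Set Char).length = 0 := rfl
  omega
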